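-- pv_equiv track=rewrite | github.com/anamillen/Yandex-DSA-Handbook | 7. Разделяй и властвуй/7.2. Поиск доминирующего элемента/Поиск трех доминирующих элементов/brute_force.py | has_3_dominants
-- ===== SOURCE A (Python) =====
-- def has_3_dominants(len_li, li):
--     """Returns 1 if the list li has 3 dominant elements,
--     0 otherwise"""
--     counter = {}
--     cands = []
--     for el in li:
--         if el in counter:
--             counter[el] += 1
--         else:   # if the element is encountered for the 1st time then
--             counter[el] = 1
--     for num in counter:
--         if counter[num] > len_li // 4:
--             cands.append(num)
--     if len(cands)==3:
--         return 1
--     else:   # if the number of candidates is smaller than 3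
--         return 0
-- ===== SOURCE B (Python) =====
-- def has_3_dominants(len_li, li):
--     """Returns 1 if the list li has 3 dominant elements,
--     0 otherwise"""
--     t = len_li // 4
--     s = sorted(li)
--     n = len(s)
--     dom = 0
--     i = 0
--     while i < n:
--         j = i + 1
--         while j < n and s[j] == s[i]:
--             j += 1
--         if j - i > t:
--             dom += 1
--         i = j
--     return 1 if dom == 3 else 0
-- ===== Notes on version B (the rewrite author's own statement) =====
-- stated objective: alternative
-- what changed: B drops A's dict-of-counts plus key-scan entirely: it sorts a copy of the list and counts, in one pass over the sorted copy, the maximal runs of equal elements longer than len_li // 4, returning 1 iff exactly 3 such runs exist.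
import Mathlib
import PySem

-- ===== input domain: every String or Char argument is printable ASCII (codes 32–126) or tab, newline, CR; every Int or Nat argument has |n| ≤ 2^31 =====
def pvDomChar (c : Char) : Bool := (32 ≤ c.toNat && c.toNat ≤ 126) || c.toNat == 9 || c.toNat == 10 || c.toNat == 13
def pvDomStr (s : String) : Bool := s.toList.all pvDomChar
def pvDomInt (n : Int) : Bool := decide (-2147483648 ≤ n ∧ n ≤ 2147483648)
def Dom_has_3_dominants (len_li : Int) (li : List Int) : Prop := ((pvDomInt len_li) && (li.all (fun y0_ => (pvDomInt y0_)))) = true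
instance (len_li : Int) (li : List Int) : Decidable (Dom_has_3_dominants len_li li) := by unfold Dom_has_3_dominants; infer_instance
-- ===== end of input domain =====

-- B replaces A's hash-counting (a dict of counts, then a scan over its keys) by sort-then-group:
-- sort a copy and count the maximal runs longer than len_li // 4 in one pass (objective: alternative).

-- ===== PORT A =====
def has_3_dominants (len_li : Int) (li : List Int) : Int :=
  let counter : PySem.Dict Int Int :=
    li.foldl (fun d el => if d.contains el then d.modify el 0 (· + 1) else d.insert el 1)
      PySem.Dict.empty
  let cands : List Int :=
    counter.keys.foldl (fun cands num =>
      if counter.getD num 0 > PySem.Int.floordiv len_li 4 then cands ++ [num] else cands) []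
  if cands.length == 3 then 1 else 0

-- ===== PORT B =====
-- the outer while-loop of Source B: consume one maximal run (the inner `while s[j] == s[i]` scan
-- is the takeWhile/dropWhile split), add 1 to dom when the run is longer than t
def pvRuns (t : Int) : List Int → Int
  | [] => 0
  | x :: xs =>
      (if (((xs.takeWhile (· == x)).length + 1 : Nat) : Int) > t then 1 else 0)
        + pvRuns t (xs.dropWhile (· == x))
termination_by l => l.length
decreasing_by simpa using Nat.lt_succ_of_le (List.length_dropWhile_le _ _)

def has_3_dominants_alt (len_li : Int) (li : List Int) : Int :=
  let t := PySem.Int.floordiv len_li 4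
  let s := PySem.List.sorted li (fun x => x) false
  let dom := pvRuns t s
  if dom == 3 then 1 else 0

-- ===== PRECONDITION & SPEC =====
def Spec_has_3_dominants (len_li : Int) (li : List Int) (out : Int) : Prop := out = has_3_dominants_alt len_li li
instance (len_li : Int) (li : List Int) (out : Int) : Decidable (Spec_has_3_dominants len_li li out) := by unfold Spec_has_3_dominants; infer_instance

-- ===== CLAIM (what is proved, stated in full; the proofs are below) =====
def Claim_equal_has_3_dominants : Prop := ∀ (len_li : Int) (li : List Int), Dom_has_3_dominants len_li li → Spec_has_3_dominants len_li li (has_3_dominants len_li li)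

-- ===== LEMMAS AND PROOFS =====

-- the common yardstick: number of distinct values of l whose multiplicity exceeds t
def pvN (t : Int) (l : List Int) : Nat :=
  (l.toFinset.filter (fun x => t < (l.count x : Int))).card

-- A's per-element dict update ('+= 1' when present, '= 1' when absent) is Counter's update
lemma stepA_eq :
    (fun (d : PySem.Dict Int Int) el =>
        if d.contains el then d.modify el 0 (· + 1) else d.insert el 1)
      = fun d el => d.modify el 0 (· + 1) := by
  funext d el
  by_cases h : d.contains el
  · simp [h]
  · simp only [h, if_neg, Bool.false_eq_true, not_false_iff]
    unfold PySem.Dict.modify PySem.Dict.getD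
    rw [show d.get? el = none from ?_]
    · rfl
    · unfold PySem.Dict.get? PySem.Dict.contains at *
      simp only [List.any_eq_true, not_exists, not_and] at h
      simp only [List.find?_eq_none, Option.map_eq_none_iff]
      intro p hp
      exact h p hp

-- countP over a nodup list is a Finset-filter card
lemma countP_nodup_eq_card (l : List Int) (hl : l.Nodup) (p : Int → Bool) :
    l.countP p = (l.toFinset.filter (fun x => p x = true)).card := by
  rw [List.countP_eq_length_filter, ← List.toFinset_filter,
      List.toFinset_card_of_nodup (hl.filter p)]

-- A computes (pvN (len_li // 4) li == 3)
lemma hasA_eq (len_li : Int) (li : List Int) :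
    has_3_dominants len_li li
      = if pvN (PySem.Int.floordiv len_li 4) li == 3 then 1 else 0 := by
  unfold has_3_dominants
  rw [stepA_eq]
  rw [show li.foldl (fun d el => d.modify el 0 (· + 1)) PySem.Dict.empty
        = PySem.Dict.counter li from (PySem.Dict.counter_eq_foldl li).symm]
  simp only [PySem.Dict.keys_counter, PySem.Dict.getD_counter,
    PySem.List.foldl_append_ite_eq_filter, List.nil_append,
    ← List.countP_eq_length_filter]
  rw [countP_nodup_eq_card _ (PySem.Set.nodup_ofList li)]
  congr 2
  unfold pvN
  have hfs : (PySem.Set.ofList li).toFinset = li.toFinset := by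
    ext x; simp [PySem.Set.mem_ofList]
  rw [hfs]
  simp [gt_iff_lt]

-- on an ascending list, everything past the leading run of x is strictly greater than x
lemma pv_dropWhile_gt (x : Int) (xs : List Int) (hpw : xs.Pairwise (· ≤ ·))
    (hx_le : ∀ y ∈ xs, x ≤ y) : ∀ y ∈ xs.dropWhile (· == x), x < y := by
  cases hdd : xs.dropWhile (· == x) with
  | nil => simp
  | cons b bs =>
    have hb_ne : (b == x) = false := by
      have := List.head_dropWhile_not (fun y => y == x) (l := xs) (by rw [hdd]; simp)
      simpa [hdd] using this
    have hb_mem : b ∈ xs := (List.dropWhile_sublist _).mem (hdd ▸ List.mem_cons_self)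
    have hbne : b ≠ x := by simpa using hb_ne
    have hbx : x < b := lt_of_le_of_ne (hx_le b hb_mem) (Ne.symm hbne)
    have hpw' : (b :: bs).Pairwise (· ≤ ·) := hdd ▸ hpw.sublist (List.dropWhile_sublist _)
    intro y hy
    rcases List.mem_cons.mp hy with rfl | hy'
    · exact hbx
    · exact lt_of_lt_of_le hbx ((List.pairwise_cons.mp hpw').1 y hy')

-- the run scan on an ascending list counts the distinct over-threshold values
lemma pvRuns_sorted_aux (t : Int) (n : Nat) :
    ∀ l : List Int, l.length ≤ n → l.Pairwise (· ≤ ·) → pvRuns t l = (pvN t l : Int) := by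
  induction n with
  | zero =>
    intro l hl _
    have : l = [] := List.eq_nil_of_length_eq_zero (Nat.le_zero.mp hl)
    subst this
    simp [pvRuns, pvN]
  | succ n ih =>
    intro l hl hp
    match l with
    | [] => simp [pvRuns, pvN]
    | x :: xs =>
      obtain ⟨hx_le, hxs_pw⟩ := List.pairwise_cons.mp hp
      have hsplit : xs.takeWhile (· == x) ++ xs.dropWhile (· == x) = xs :=
        List.takeWhile_append_dropWhile
      have htw_all : ∀ y ∈ xs.takeWhile (· == x), y = x := by
        intro y hy
        simpa using List.mem_takeWhile_imp hy
      have hgt : ∀ y ∈ xs.dropWhile (· == x), x < y := pv_dropWhile_gt x xs hxs_pw hx_le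
      have hdw_pw : (xs.dropWhile (· == x)).Pairwise (· ≤ ·) :=
        hxs_pw.sublist (List.dropWhile_sublist _)
      have hx_notin_dw : x ∉ xs.dropWhile (· == x) := fun h => lt_irrefl x (hgt x h)
      have hcount_tw : (xs.takeWhile (· == x)).count x = (xs.takeWhile (· == x)).length := by
        rw [List.count_eq_length]
        intro y hy; exact (htw_all y hy).symm
      have hcount_x : (x :: xs).count x = (xs.takeWhile (· == x)).length + 1 := by
        have h1 : xs.count x = (xs.takeWhile (· == x)).length := by
          conv_lhs => rw [← hsplit]
          rw [List.count_append, List.count_eq_zero_of_not_mem hx_notin_dw, hcount_tw,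
            Nat.add_zero]
        rw [List.count_cons_self, h1]
      have hcount_dw : ∀ y ∈ xs.dropWhile (· == x), (x :: xs).count y = (xs.dropWhile (· == x)).count y := by
        intro y hy
        have hxy : x ≠ y := ne_of_lt (hgt y hy)
        have h0 : (xs.takeWhile (· == x)).count y = 0 := by
          rw [List.count_eq_zero_of_not_mem]
          intro hmem; exact hxy (htw_all y hmem).symm
        have h1 : xs.count y = (xs.dropWhile (· == x)).count y := by
          conv_lhs => rw [← hsplit]
          rw [List.count_append, h0, Nat.zero_add]
        rw [List.count_cons_of_ne hxy, h1]
      have hxs_mem : ∀ y, y ∈ xs ↔ y ∈ xs.takeWhile (· == x) ∨ y ∈ xs.dropWhile (· == x) := by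
        intro y
        conv_lhs => rw [← hsplit]
        exact List.mem_append
      have hfs : (x :: xs).toFinset = insert x (xs.dropWhile (· == x)).toFinset := by
        ext y
        simp only [List.toFinset_cons, Finset.mem_insert, List.mem_toFinset]
        rw [hxs_mem y]
        constructor
        · rintro (rfl | h | h)
          · exact Or.inl rfl
          · exact Or.inl (htw_all y h)
          · exact Or.inr h
        · rintro (rfl | h)
          · exact Or.inl rfl
          · exact Or.inr (Or.inr h)
      have hN : pvN t (x :: xs)
          = (if t < (((xs.takeWhile (· == x)).length + 1 : Nat) : Int) then 1 else 0)
            + pvN t (xs.dropWhile (· == x)) := by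
        unfold pvN
        rw [hfs, Finset.filter_insert]
        have hfc : Finset.filter (fun y => t < ((x :: xs).count y : Int)) (xs.dropWhile (· == x)).toFinset
            = Finset.filter (fun y => t < ((xs.dropWhile (· == x)).count y : Int)) (xs.dropWhile (· == x)).toFinset := by
          apply Finset.filter_congr
          intro y hy
          rw [hcount_dw y (List.mem_toFinset.mp hy)]
        have hxnot : x ∉ Finset.filter (fun y => t < ((xs.dropWhile (· == x)).count y : Int)) (xs.dropWhile (· == x)).toFinset := by
          simp [List.mem_toFinset, hx_notin_dw]
        rw [hcount_x]
        split_ifs with hcond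
        · rw [hfc, Finset.card_insert_of_notMem hxnot]; omega
        · rw [hfc]; omega
      have hlen : (xs.dropWhile (· == x)).length ≤ n := by
        have h1 : (xs.dropWhile (· == x)).length ≤ xs.length := List.length_dropWhile_le _ _
        simp only [List.length_cons] at hl
        omega
      rw [pvRuns, ih _ hlen hdw_pw, hN]
      push_cast
      split_ifs with h1 <;> ring

-- pvN only depends on the multiset of l
lemma pvN_perm (t : Int) {l l' : List Int} (h : l.Perm l') : pvN t l = pvN t l' := by
  unfold pvN
  rw [List.toFinset_eq_of_perm l l' h]
  congr 1
  apply Finset.filter_congr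
  intro x _
  simp [h.count_eq]

-- ===== VERDICT (by name: the statement is the Claim_ definition above) =====
theorem has_3_dominants_spec : Claim_equal_has_3_dominants := by
  intro len_li li _
  unfold Spec_has_3_dominants
  rw [hasA_eq]
  show _ = has_3_dominants_alt len_li li
  dsimp only [has_3_dominants_alt]
  rw [pvRuns_sorted_aux _ (PySem.List.sorted li (fun x => x) false).length _ le_rfl
        (by simpa using PySem.List.sorted_pairwise li (fun x => x)),
      pvN_perm _ (PySem.List.sorted_perm li (fun x => x) false)]
  simp only [beq_iff_eq]
  split_ifs with h1 h2 h2
  · rfl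
  · exact absurd (by exact_mod_cast h1) h2
  · exact absurd (by exact_mod_cast h2) h1
  · rfl
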